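-- pv_equiv track=rewrite | github.com/mafpub/best.football | scrapers/schools/ca/062241002677.py | _extract_coaches
-- ===== SOURCE A (Python) =====
-- from typing import Any
--
-- def _dedupe_keep_order(values: list[Any]) -> list[Any]:
--     seen: set[str] = set()
--     out: list[Any] = []
--     for value in values:
--         marker = repr(value)
--         if marker in seen:
--             continue
--         seen.add(marker)
--         out.append(value)
--     return out
--
-- def _extract_coaches(lines: list[str]) -> list[dict[str, str]]:
--     coaches: list[dict[str, str]] = []
--     try:
--         start = lines.index("Coaching Staff") + 1
--     except ValueError:
--         return coaches
--
--     end = len(lines)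
--     for marker in ("Football Game Schedules - Printable", "Permission to Transport Form"):
--         if marker in lines[start:]:
--             end = lines.index(marker, start)
--             break
--
--     coach_lines = lines[start:end]
--     for index in range(0, len(coach_lines) - 1, 2):
--         name = coach_lines[index]
--         role = coach_lines[index + 1]
--         if not name or not role:
--             continue
--         if "coach" not in role.lower():
--             continue
--         coaches.append({"name": name, "role": role})
--     return _dedupe_keep_order(coaches)
-- ===== SOURCE B (Python) =====
-- def _extract_coaches(lines):
--     if "Coaching Staff" not in lines:
--         return []
--     rest = lines[lines.index("Coaching Staff") + 1:]
--     for marker in ("Football Game Schedules - Printable", "Permission to Transport Form"):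
--         if marker in rest:
--             rest = rest[:rest.index(marker)]
--             break
--     coaches = []
--     while len(rest) >= 2:
--         name, role, rest = rest[0], rest[1], rest[2:]
--         if name and role and "coach" in role.lower():
--             d = {"name": name, "role": role}
--             if d not in coaches:
--                 coaches.append(d)
--     return coaches
-- ===== Notes on version B (the rewrite author's own statement) =====
-- stated objective: simpler
-- what changed: B never computes absolute start/end indices or a range of indices: it slices off the header, truncates the tail at the end marker, then destructively consumes the remaining list two elements at a time in a while loop, deduplicating by plain list membership of the dict itself (no _dedupe_keep_order helper, no set, no repr keys).
import Mathlib
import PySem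

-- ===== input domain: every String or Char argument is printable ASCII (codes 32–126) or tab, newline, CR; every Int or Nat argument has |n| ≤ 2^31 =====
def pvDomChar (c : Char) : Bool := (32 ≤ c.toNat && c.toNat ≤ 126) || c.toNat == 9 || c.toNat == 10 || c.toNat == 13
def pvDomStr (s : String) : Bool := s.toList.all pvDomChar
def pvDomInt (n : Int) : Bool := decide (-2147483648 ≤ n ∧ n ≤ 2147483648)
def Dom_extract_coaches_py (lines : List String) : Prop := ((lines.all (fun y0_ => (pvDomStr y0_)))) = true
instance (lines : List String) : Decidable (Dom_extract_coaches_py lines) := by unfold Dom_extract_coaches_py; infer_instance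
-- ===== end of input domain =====

-- B drops A's index arithmetic and the _dedupe_keep_order helper: it slices off the header,
-- truncates at the end marker, then consumes the list two elements at a time with a while loop,
-- deduplicating by plain list membership of the dict; simpler, same results.

-- ===== PORT A =====
-- Python _dedupe_keep_order. Python keys the seen-set by repr(value); repr is injective on these
-- dicts (fixed keys 'name','role' inserted in that order, string values), so membership of repr(value)
-- coincides with membership of the value and the set holds the dicts themselves (exact).
def pvDedupeKeepOrder (values : List (List (String × String))) : List (List (String × String)) :=
  (values.foldl
    (fun (st : PySem.Set (List (String × String)) × List (List (String × String))) value =>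
      if st.1.contains value then st
      else (st.1.add value, st.2 ++ [value]))
    (PySem.Set.empty, [])).2

def extract_coaches_py (lines : List String) : List (List (String × String)) :=
  match PySem.List.index? lines "Coaching Staff" with
  | none => []                                        -- except ValueError: return coaches (= [])
  | some i =>
    let start := i + 1
    let tail := PySem.List.slice lines (some (start : Int)) none   -- lines[start:]
    -- for marker in (...): if marker in lines[start:]: end = lines.index(marker, start); break
    -- lines.index(marker, start) = start + lines[start:].index(marker)  (exact: search starts at start)
    let endIdx : Nat :=
      if tail.contains "Football Game Schedules - Printable" then
        start + ((PySem.List.index? tail "Football Game Schedules - Printable").getD 0)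
      else if tail.contains "Permission to Transport Form" then
        start + ((PySem.List.index? tail "Permission to Transport Form").getD 0)
      else lines.length
    let coach_lines := PySem.List.slice lines (some (start : Int)) (some (endIdx : Int))
    let raw := (PySem.List.pyRange 0 ((coach_lines.length : Int) - 1) 2).foldl
      (fun acc idx =>
        let name := PySem.List.pyGetD coach_lines idx ""
        let role := PySem.List.pyGetD coach_lines (idx + 1) ""
        if name = "" || role = "" then acc            -- if not name or not role: continue
        else if !(PySem.Str.isIn "coach" (PySem.Str.lower role)) then acc
        else acc ++ [[("name", name), ("role", role)]]) []
    pvDedupeKeepOrder raw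

-- ===== PORT B =====
-- the while loop: rest has ≥ 2 elements → pull off two, maybe append the dict, continue on rest[2:]
def pvConsume : List String → List (List (String × String)) → List (List (String × String))
  | name :: role :: rest, coaches =>
      if name != "" && role != "" && PySem.Str.isIn "coach" (PySem.Str.lower role) then
        let d := [("name", name), ("role", role)]
        if coaches.contains d then pvConsume rest coaches
        else pvConsume rest (coaches ++ [d])
      else pvConsume rest coaches
  | _, coaches => coaches                             -- len(rest) < 2: loop ends

def extract_coaches_py_alt (lines : List String) : List (List (String × String)) :=
  if !(lines.contains "Coaching Staff") then []
  else
    -- rest = lines[lines.index("Coaching Staff") + 1:]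
    let rest0 := PySem.List.slice lines
      (some ((((PySem.List.index? lines "Coaching Staff").getD 0 : Nat) : Int) + 1)) none
    -- for marker in (...): if marker in rest: rest = rest[:rest.index(marker)]; break
    let rest :=
      if rest0.contains "Football Game Schedules - Printable" then
        PySem.List.slice rest0 none
          (some (((PySem.List.index? rest0 "Football Game Schedules - Printable").getD 0 : Nat) : Int))
      else if rest0.contains "Permission to Transport Form" then
        PySem.List.slice rest0 none
          (some (((PySem.List.index? rest0 "Permission to Transport Form").getD 0 : Nat) : Int))
      else rest0
    pvConsume rest []

-- ===== PRECONDITION & SPEC =====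
def Spec_extract_coaches_py (lines : List String) (out : List (List (String × String))) : Prop := out = extract_coaches_py_alt lines
instance (lines : List String) (out : List (List (String × String))) : Decidable (Spec_extract_coaches_py lines out) := by unfold Spec_extract_coaches_py; infer_instance

-- ===== CLAIM (what is proved, stated in full; the proofs are below) =====
def Claim_equal_extract_coaches_py : Prop := ∀ (lines : List String), Dom_extract_coaches_py lines → Spec_extract_coaches_py lines (extract_coaches_py lines)

-- ===== LEMMAS AND PROOFS =====

-- proof-side abbreviations for the shared filter and the dict built from a pair
def pvKeep (nr : String × String) : Bool :=
  nr.1 != "" && nr.2 != "" && PySem.Str.isIn "coach" (PySem.Str.lower nr.2)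

def pvToDict (nr : String × String) : List (String × String) :=
  [("name", nr.1), ("role", nr.2)]

def pvPairs : List String → List (String × String)
  | a :: b :: t => (a, b) :: pvPairs t
  | _ => []

theorem pvAdd_mem {α : Type} [BEq α] [LawfulBEq α] (s : PySem.Set α) (x : α) (h : x ∈ s) :
    PySem.Set.add s x = s := by
  simp [PySem.Set.add, h]

theorem pvAdd_not_mem {α : Type} [BEq α] [LawfulBEq α] (s : PySem.Set α) (x : α) (h : x ∉ s) :
    PySem.Set.add s x = s ++ [x] := by
  simp [PySem.Set.add, h]

-- A's dedupe helper maintains seen = out, so it is the Set.add fold = Python's ordered dedup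
theorem pvDedupeAux (vs : List (List (String × String))) (s : PySem.Set (List (String × String))) :
    (vs.foldl
      (fun (st : PySem.Set (List (String × String)) × List (List (String × String))) value =>
        if st.1.contains value then st
        else (st.1.add value, st.2 ++ [value])) (s, s)).2
    = vs.foldl PySem.Set.add s := by
  induction vs generalizing s with
  | nil => rfl
  | cons v t ih =>
    simp only [List.foldl_cons]
    by_cases h : v ∈ s
    · rw [if_pos ((PySem.Set.contains_iff s v).mpr h), pvAdd_mem s v h]; exact ih s
    · have hc : ¬ (s.contains v = true) := fun hc => h ((PySem.Set.contains_iff s v).mp hc)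
      rw [if_neg hc, pvAdd_not_mem s v h]; exact ih (s ++ [v])

theorem pvDedupe_eq_fold (vs : List (List (String × String))) :
    pvDedupeKeepOrder vs = vs.foldl PySem.Set.add [] := by
  rw [pvDedupeKeepOrder]
  exact pvDedupeAux vs []

-- B's while loop is the Set.add fold of the filtered pairs rendered as dicts
theorem pvConsume_fold (cl : List String) (acc : List (List (String × String))) :
    pvConsume cl acc = (((pvPairs cl).filter pvKeep).map pvToDict).foldl PySem.Set.add acc := by
  match cl with
  | [] => rfl
  | [a] => rfl
  | a :: b :: t =>
    rw [pvConsume, pvPairs, List.filter_cons]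
    by_cases hk : pvKeep (a, b) = true
    · have hk' : (a != "" && b != "" && PySem.Str.isIn "coach" (PySem.Str.lower b)) = true := hk
      rw [if_pos hk, if_pos hk', List.map_cons, List.foldl_cons]
      show (if List.contains acc (pvToDict (a, b)) then pvConsume t acc
            else pvConsume t (acc ++ [pvToDict (a, b)]))
         = List.foldl PySem.Set.add (PySem.Set.add acc (pvToDict (a, b)))
             (List.map pvToDict (List.filter pvKeep (pvPairs t)))
      by_cases hm : pvToDict (a, b) ∈ acc
      · rw [if_pos (by simpa using hm), pvAdd_mem acc _ hm]
        exact pvConsume_fold t acc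
      · rw [if_neg (by simpa using hm), pvAdd_not_mem acc _ hm]
        exact pvConsume_fold t (acc ++ [pvToDict (a, b)])
    · have hk' : ¬ ((a != "" && b != "" && PySem.Str.isIn "coach" (PySem.Str.lower b)) = true) := hk
      rw [if_neg hk, if_neg hk']
      exact pvConsume_fold t acc

-- step-2 range peeling: range(0, m, 2) = 0 :: [k+2 for k in range(0, m-2, 2)]
theorem pvRange_two_cons (m : Int) (hm : 0 < m) :
    PySem.List.pyRange 0 m 2 = 0 :: (PySem.List.pyRange 0 (m - 2) 2).map (· + 2) := by
  rw [PySem.List.pyRange_of_pos _ _ (by norm_num), PySem.List.pyRange_of_pos _ _ (by norm_num)]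
  have h1 : (if (0:Int) < m then ((m - 0 + 2 - 1) / 2).toNat else 0)
      = (if (0:Int) < m - 2 then ((m - 2 - 0 + 2 - 1) / 2).toNat else 0) + 1 := by
    split_ifs <;> omega
  rw [h1, List.range_succ_eq_map]
  simp only [List.map_cons, List.map_map]
  norm_num
  intro k _
  ring

-- the index loop reads exactly the consecutive disjoint pairs
theorem pvRange_pairs (cl : List String) :
    (PySem.List.pyRange 0 ((cl.length : Int) - 1) 2).map
      (fun i => (PySem.List.pyGetD cl i "", PySem.List.pyGetD cl (i + 1) "")) = pvPairs cl := by
  match cl with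
  | [] => simp [PySem.List.pyRange_of_pos 0 _ (by norm_num : (0:Int) < 2), pvPairs]
  | [a] => simp [PySem.List.pyRange_of_pos 0 _ (by norm_num : (0:Int) < 2), pvPairs]
  | a :: b :: t =>
    have hm : (0:Int) < ((a :: b :: t).length : Int) - 1 := by simp
    rw [pvRange_two_cons _ hm, List.map_cons, List.map_map]
    have h0 : (PySem.List.pyGetD (a :: b :: t) 0 "", PySem.List.pyGetD (a :: b :: t) (0 + 1) "") = (a, b) := by
      norm_num [PySem.List.pyGetD_of_nonneg]
    have hlen : ((a :: b :: t).length : Int) - 1 - 2 = ((t.length : Int) - 1) := by simp; ring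
    rw [h0, hlen, pvPairs]
    congr 1
    rw [← pvRange_pairs t]
    apply List.map_congr_left
    intro i hi
    have hnn : 0 ≤ i := ((PySem.List.mem_pyRange_iff_of_pos (by norm_num) i).mp hi).1
    simp only [Function.comp_apply]
    have e1 : PySem.List.pyGetD (a :: b :: t) (i + 2) "" = PySem.List.pyGetD t i "" := by
      rw [PySem.List.pyGetD_of_nonneg _ _ (by omega), PySem.List.pyGetD_of_nonneg _ _ hnn]
      have : (i + 2).toNat = i.toNat + 2 := by omega
      rw [this]
      rfl
    have e2 : PySem.List.pyGetD (a :: b :: t) (i + 2 + 1) "" = PySem.List.pyGetD t (i + 1) "" := by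
      rw [PySem.List.pyGetD_of_nonneg _ _ (by omega), PySem.List.pyGetD_of_nonneg _ _ (by omega)]
      have : (i + 2 + 1).toNat = (i + 1).toNat + 2 := by omega
      rw [this]
      rfl
    rw [e1, e2]

-- A's branch chain is one boolean filter step
theorem pvIfShape (n r : String) (acc : List (List (String × String))) :
    (if n = "" || r = "" then acc
     else if !(PySem.Str.isIn "coach" (PySem.Str.lower r)) then acc
     else acc ++ [[("name", n), ("role", r)]])
    = (if pvKeep (n, r) = true then acc ++ [pvToDict (n, r)] else acc) := by
  simp only [pvKeep, pvToDict]
  by_cases h1 : n = "" <;> by_cases h2 : r = "" <;>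
    cases hc : PySem.Str.isIn "coach" (PySem.Str.lower r) <;> simp_all

-- A's raw loop produces the filtered pairs as dicts
theorem pvRawA (cl : List String) :
    (PySem.List.pyRange 0 ((cl.length : Int) - 1) 2).foldl
      (fun acc idx =>
        let name := PySem.List.pyGetD cl idx ""
        let role := PySem.List.pyGetD cl (idx + 1) ""
        if name = "" || role = "" then acc
        else if !(PySem.Str.isIn "coach" (PySem.Str.lower role)) then acc
        else acc ++ [[("name", name), ("role", role)]]) []
    = ((pvPairs cl).filter pvKeep).map pvToDict := by
  have hstep : (fun (acc : List (List (String × String))) idx =>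
        let name := PySem.List.pyGetD cl idx ""
        let role := PySem.List.pyGetD cl (idx + 1) ""
        if name = "" || role = "" then acc
        else if !(PySem.Str.isIn "coach" (PySem.Str.lower role)) then acc
        else acc ++ [[("name", name), ("role", role)]])
      = (fun acc idx =>
        if (fun i => pvKeep (PySem.List.pyGetD cl i "", PySem.List.pyGetD cl (i + 1) "")) idx = true
        then acc ++ [(fun i => pvToDict (PySem.List.pyGetD cl i "", PySem.List.pyGetD cl (i + 1) "")) idx]
        else acc) := by
    funext acc idx
    exact pvIfShape _ _ acc
  rw [hstep, PySem.List.foldl_append_if]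
  rw [show (fun i => pvToDict (PySem.List.pyGetD cl i "", PySem.List.pyGetD cl (i + 1) ""))
        = pvToDict ∘ (fun i => (PySem.List.pyGetD cl i "", PySem.List.pyGetD cl (i + 1) "")) from rfl]
  rw [show (fun i => pvKeep (PySem.List.pyGetD cl i "", PySem.List.pyGetD cl (i + 1) ""))
        = pvKeep ∘ (fun i => (PySem.List.pyGetD cl i "", PySem.List.pyGetD cl (i + 1) "")) from rfl]
  rw [List.nil_append, ← pvRange_pairs cl, List.filter_map, List.map_map]

-- A's coach_lines slice equals B's truncated rest, marker case by marker case
theorem pvSlices_eq (lines : List String) (start : Nat) :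
    PySem.List.slice lines (some (start : Int))
      (some (((if (PySem.List.slice lines (some (start : Int)) none).contains "Football Game Schedules - Printable" then
          start + ((PySem.List.index? (PySem.List.slice lines (some (start : Int)) none) "Football Game Schedules - Printable").getD 0)
        else if (PySem.List.slice lines (some (start : Int)) none).contains "Permission to Transport Form" then
          start + ((PySem.List.index? (PySem.List.slice lines (some (start : Int)) none) "Permission to Transport Form").getD 0)
        else lines.length : Nat)) : Int))
    = (if (PySem.List.slice lines (some (start : Int)) none).contains "Football Game Schedules - Printable" then
        PySem.List.slice (PySem.List.slice lines (some (start : Int)) none) none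
          (some (((PySem.List.index? (PySem.List.slice lines (some (start : Int)) none) "Football Game Schedules - Printable").getD 0 : Nat) : Int))
      else if (PySem.List.slice lines (some (start : Int)) none).contains "Permission to Transport Form" then
        PySem.List.slice (PySem.List.slice lines (some (start : Int)) none) none
          (some (((PySem.List.index? (PySem.List.slice lines (some (start : Int)) none) "Permission to Transport Form").getD 0 : Nat) : Int))
      else PySem.List.slice lines (some (start : Int)) none) := by
  rw [PySem.List.slice_from_natCast]
  split_ifs with h1 h2
  · rw [PySem.List.slice_to_natCast]
    rw [show ((start + ((PySem.List.index? (lines.drop start) "Football Game Schedules - Printable").getD 0) : Nat) : Int)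
          = ((start : Int) + (((PySem.List.index? (lines.drop start) "Football Game Schedules - Printable").getD 0 : Nat) : Int)) by push_cast; ring]
    rw [PySem.List.slice_natCast_add]
  · rw [PySem.List.slice_to_natCast]
    rw [show ((start + ((PySem.List.index? (lines.drop start) "Permission to Transport Form").getD 0) : Nat) : Int)
          = ((start : Int) + (((PySem.List.index? (lines.drop start) "Permission to Transport Form").getD 0 : Nat) : Int)) by push_cast; ring]
    rw [PySem.List.slice_natCast_add]
  · rw [PySem.List.slice_natCast]
    have : lines.length - start ≥ (lines.drop start).length := by simp
    rw [List.take_of_length_le (by simpa using this)]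

-- ===== VERDICT (by name: the statement is the Claim_ definition above) =====
theorem extract_coaches_py_spec : Claim_equal_extract_coaches_py := by
  intro lines _
  unfold Spec_extract_coaches_py extract_coaches_py extract_coaches_py_alt
  cases h : PySem.List.index? lines "Coaching Staff" with
  | none =>
    have : lines.contains "Coaching Staff" = false := by
      have := (PySem.List.index?_eq_none_iff lines "Coaching Staff").mp h
      simpa using fun hc => this (List.elem_iff.mp hc)
    rw [this]
    rfl
  | some i =>
    have hc : lines.contains "Coaching Staff" = true := by
      have : "Coaching Staff" ∈ lines :=
        (PySem.List.index?_isSome_iff _ _).mp (by rw [h]; rfl)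
      simpa using List.elem_iff.mpr this
    rw [hc]
    simp only [Bool.not_true, if_neg (by simp : ¬ (false = true)), h, Option.getD_some]
    rw [pvRawA, pvDedupe_eq_fold, ← pvConsume_fold _ []]
    rw [pvSlices_eq lines (i + 1)]
    push_cast
    rfl
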